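-- pv_equiv track=rewrite | github.com/sada-narayanappa/PyUtils | DisplayUtils.py | formatContentDELETEIT
-- ===== SOURCE A (Python) =====
-- def formatContentDELETEIT(c):
--     c1 = str(c).lower().strip()
--     g=[k.lower().strip() for k in "complete, finished, success, Yes".split(",") ]
--     r=[k.lower().strip() for k in "error, err, failed, no".split(",") ]
--     y=[k.lower().strip() for k in "pending, ongoing, current".split(",") ]
--     s = ""
--     if (c1 in g):
--          s = "bgcolor=lightgreen";
--     elif (c1 in r):
--          s = "bgcolor=#FFAEAE";
--     elif (c1 in y):
--          s = "bgcolor=lightyellow";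
--
--     return "<td " + s + ">" + str(c) + "</td>"
-- ===== SOURCE B (Python) =====
-- # B: binary search over one sorted keyword->color table instead of three
-- # per-call lists scanned by an if/elif membership chain.
-- _TABLE = [
--     ("complete", "bgcolor=lightgreen"),
--     ("current", "bgcolor=lightyellow"),
--     ("err", "bgcolor=#FFAEAE"),
--     ("error", "bgcolor=#FFAEAE"),
--     ("failed", "bgcolor=#FFAEAE"),
--     ("finished", "bgcolor=lightgreen"),
--     ("no", "bgcolor=#FFAEAE"),
--     ("ongoing", "bgcolor=lightyellow"),
--     ("pending", "bgcolor=lightyellow"),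
--     ("success", "bgcolor=lightgreen"),
--     ("yes", "bgcolor=lightgreen"),
-- ]
--
-- def _bsearch(key, lo, hi):
--     while lo < hi:
--         mid = (lo + hi) // 2
--         k, v = _TABLE[mid]
--         if key == k:
--             return v
--         if key < k:
--             hi = mid
--         else:
--             lo = mid + 1
--     return ""
--
-- def formatContentDELETEIT(c):
--     t = str(c)
--     s = _bsearch(t.lower().strip(), 0, len(_TABLE))
--     return "<td " + s + ">" + t + "</td>"
-- ===== Notes on version B (the rewrite author's own statement) =====
-- stated objective: alternative
-- what changed: A rebuilds three keyword lists each call and scans them through an if/elif membership chain; B keeps one sorted keyword->color table and finds the color with a hand-written iterative binary search (empty string when absent).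
import Mathlib
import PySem

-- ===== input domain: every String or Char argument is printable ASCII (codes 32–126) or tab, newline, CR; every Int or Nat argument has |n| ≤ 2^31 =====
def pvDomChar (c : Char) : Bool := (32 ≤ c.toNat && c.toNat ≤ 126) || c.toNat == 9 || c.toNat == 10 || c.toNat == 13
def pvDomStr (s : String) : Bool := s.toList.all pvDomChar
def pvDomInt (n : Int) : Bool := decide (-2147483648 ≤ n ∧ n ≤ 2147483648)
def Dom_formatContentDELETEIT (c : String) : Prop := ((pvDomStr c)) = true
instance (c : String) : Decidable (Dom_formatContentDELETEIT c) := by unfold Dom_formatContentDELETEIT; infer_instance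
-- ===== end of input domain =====

-- B replaces A's per-call list building + if/elif membership chain by a binary search over one static sorted keyword→color table (alternative algorithm, same result).

-- ===== PORT A =====
def formatContentDELETEIT (c : String) : String :=
  let c1 := PySem.Str.strip (PySem.Str.lower c)
  let g := (((PySem.Str.split? "complete, finished, success, Yes" ",").getD [])).map
             (fun k => PySem.Str.strip (PySem.Str.lower k))
  let r := (((PySem.Str.split? "error, err, failed, no" ",").getD [])).map
             (fun k => PySem.Str.strip (PySem.Str.lower k))
  let y := (((PySem.Str.split? "pending, ongoing, current" ",").getD [])).map
             (fun k => PySem.Str.strip (PySem.Str.lower k))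
  let s := if c1 ∈ g then "bgcolor=lightgreen"
           else if c1 ∈ r then "bgcolor=#FFAEAE"
           else if c1 ∈ y then "bgcolor=lightyellow"
           else ""
  "<td " ++ s ++ ">" ++ c ++ "</td>"

-- ===== PORT B =====
def pvTable : List (String × String) :=
  [("complete", "bgcolor=lightgreen"),
   ("current", "bgcolor=lightyellow"),
   ("err", "bgcolor=#FFAEAE"),
   ("error", "bgcolor=#FFAEAE"),
   ("failed", "bgcolor=#FFAEAE"),
   ("finished", "bgcolor=lightgreen"),
   ("no", "bgcolor=#FFAEAE"),
   ("ongoing", "bgcolor=lightyellow"),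
   ("pending", "bgcolor=lightyellow"),
   ("success", "bgcolor=lightgreen"),
   ("yes", "bgcolor=lightgreen")]

-- the while-loop of Source B's _bsearch; terminates because hi-lo shrinks
def pvBsearch (key : String) (lo hi : Nat) : String :=
  if h : lo < hi then
    let mid := (lo + hi) / 2
    let kv := pvTable.getD mid ("", "")
    if key == kv.1 then kv.2
    else if key < kv.1 then pvBsearch key lo mid
    else pvBsearch key (mid + 1) hi
  else ""
termination_by hi - lo
decreasing_by all_goals omega

def formatContentDELETEIT_alt (c : String) : String :=
  let s := pvBsearch (PySem.Str.strip (PySem.Str.lower c)) 0 pvTable.length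
  "<td " ++ s ++ ">" ++ c ++ "</td>"

-- ===== PRECONDITION & SPEC =====
def Spec_formatContentDELETEIT (c : String) (out : String) : Prop := out = formatContentDELETEIT_alt c
instance (c : String) (out : String) : Decidable (Spec_formatContentDELETEIT c out) := by unfold Spec_formatContentDELETEIT; infer_instance

-- ===== CLAIM (what is proved, stated in full; the proofs are below) =====
def Claim_equal_formatContentDELETEIT : Prop := ∀ (c : String), Dom_formatContentDELETEIT c → Spec_formatContentDELETEIT c (formatContentDELETEIT c)

-- ===== LEMMAS AND PROOFS =====

-- A's three-list if/elif chain and B's binary search agree on every key string.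
lemma pvLookup_eq (c1 : String) :
    (if c1 ∈ (((PySem.Str.split? "complete, finished, success, Yes" ",").getD [])).map
               (fun k => PySem.Str.strip (PySem.Str.lower k)) then "bgcolor=lightgreen"
     else if c1 ∈ (((PySem.Str.split? "error, err, failed, no" ",").getD [])).map
               (fun k => PySem.Str.strip (PySem.Str.lower k)) then "bgcolor=#FFAEAE"
     else if c1 ∈ (((PySem.Str.split? "pending, ongoing, current" ",").getD [])).map
               (fun k => PySem.Str.strip (PySem.Str.lower k)) then "bgcolor=lightyellow"
     else "") = pvBsearch c1 0 pvTable.length := by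
  have hg : (((PySem.Str.split? "complete, finished, success, Yes" ",").getD [])).map
      (fun k => PySem.Str.strip (PySem.Str.lower k)) = ["complete", "finished", "success", "yes"] := by decide
  have hr : (((PySem.Str.split? "error, err, failed, no" ",").getD [])).map
      (fun k => PySem.Str.strip (PySem.Str.lower k)) = ["error", "err", "failed", "no"] := by decide
  have hy : (((PySem.Str.split? "pending, ongoing, current" ",").getD [])).map
      (fun k => PySem.Str.strip (PySem.Str.lower k)) = ["pending", "ongoing", "current"] := by decide
  rw [hg, hr, hy]
  by_cases e1 : c1 = "complete";  · subst e1; simp [pvBsearch, pvTable]; decide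
  by_cases e2 : c1 = "current";   · subst e2; simp [pvBsearch, pvTable]; decide
  by_cases e3 : c1 = "err";       · subst e3; simp [pvBsearch, pvTable]; decide
  by_cases e4 : c1 = "error";     · subst e4; simp [pvBsearch, pvTable]; decide
  by_cases e5 : c1 = "failed";    · subst e5; simp [pvBsearch, pvTable]; decide
  by_cases e6 : c1 = "finished";  · subst e6; simp [pvBsearch, pvTable]
  by_cases e7 : c1 = "no";        · subst e7; simp [pvBsearch, pvTable]; decide
  by_cases e8 : c1 = "ongoing";   · subst e8; simp [pvBsearch, pvTable]; decide
  by_cases e9 : c1 = "pending";   · subst e9; simp [pvBsearch, pvTable]; decide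
  by_cases e10 : c1 = "success";  · subst e10; simp [pvBsearch, pvTable]; decide
  by_cases e11 : c1 = "yes";      · subst e11; simp [pvBsearch, pvTable]; decide
  simp [pvBsearch, pvTable, e1, e2, e3, e4, e5, e6, e7, e8, e9, e10, e11]

-- ===== VERDICT (by name: the statement is the Claim_ definition above) =====
theorem formatContentDELETEIT_spec : Claim_equal_formatContentDELETEIT := by
  intro c _
  exact congrArg (fun s => "<td " ++ s ++ ">" ++ c ++ "</td>") (pvLookup_eq _)
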